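-- pv_equiv track=rewrite | github.com/jcubby86/AdventOfCode | 2024/day10.py | getNines
-- ===== SOURCE A (Python) =====
-- from collections import defaultdict
--
-- dirs = [(0, 1), (0, -1), (1, 0), (-1, 0)]
--
-- def getVal(data: list[list[int]], pos: tuple[int, int]):
--     if pos[0] >= 0 and pos[0] < len(data) and pos[1] >= 0 and pos[1] < len(data[0]):
--         r, c = pos
--         return data[r][c]
--     else:
--         return None
--
-- def countNines(
--     data: list[list[int]],
--     paths: defaultdict[tuple[int, int], set],
--     current: tuple[int, int],
-- ) -> set:
--     reachableNines: set[tuple[int, int]] = set()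
--
--     val = getVal(data, current)
--     if val is None:
--         return reachableNines
--
--     for dr, dc in dirs:
--         next = current[0] + dr, current[1] + dc
--         if getVal(data, next) == val + 1:
--             reachableNines.update(paths[next])
--     return reachableNines
--
-- def getNines(data: list[list[int]]):
--     spots: defaultdict[int, set[tuple[int, int]]] = defaultdict(set)
--     paths: defaultdict[tuple[int, int], set[tuple[int, int]]] = defaultdict(set)
--
--     for i in range(9, -1, -1):
--         for r in range(len(data)):
--             for c in range(len(data[r])):
--                 val = getVal(data, (r, c))
--                 if i == 9 and val == i:
--                     spots[9].add((r, c))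
--                     paths[(r, c)].add((r, c))
--                 elif val == i:
--                     nines = countNines(data, paths, (r, c))
--                     spots[i].add((r, c))
--                     paths[(r, c)].update(nines)
--
--     return sum([len(paths[pos]) for pos in spots[0]])
-- ===== SOURCE B (Python) =====
-- # B: per-trailhead top-down DFS collecting the set of distinct 9-positions,
-- # instead of A's global backward level-ordered set-propagation DP. Objective: simpler.
--
-- dirs = [(0, 1), (0, -1), (1, 0), (-1, 0)]
--
-- def getVal(data: list[list[int]], pos: tuple[int, int]):
--     if pos[0] >= 0 and pos[0] < len(data) and pos[1] >= 0 and pos[1] < len(data[0]):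
--         r, c = pos
--         return data[r][c]
--     else:
--         return None
--
-- def nines(data, pos):
--     val = getVal(data, pos)
--     if val == 9:
--         return {pos}
--     found = set()
--     for dr, dc in dirs:
--         nxt = (pos[0] + dr, pos[1] + dc)
--         if getVal(data, nxt) == val + 1:
--             found |= nines(data, nxt)
--     return found
--
-- def getNines(data: list[list[int]]):
--     total = 0
--     for r in range(len(data)):
--         for c in range(len(data[r])):
--             if getVal(data, (r, c)) == 0:
--                 total += len(nines(data, (r, c)))
--     return total
-- ===== Notes on version B (the rewrite author's own statement) =====
-- stated objective: simpler
-- what changed: Replaces A's global backward level-by-level DP (dicts mapping every grid cell to its reachable-9 set, propagated from value 9 down to 0 over ten full-grid passes) with a per-trailhead top-down recursive DFS that follows value+1 steps and collects the set of distinct 9-positions, reusing getVal and dirs verbatim.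
import Mathlib
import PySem

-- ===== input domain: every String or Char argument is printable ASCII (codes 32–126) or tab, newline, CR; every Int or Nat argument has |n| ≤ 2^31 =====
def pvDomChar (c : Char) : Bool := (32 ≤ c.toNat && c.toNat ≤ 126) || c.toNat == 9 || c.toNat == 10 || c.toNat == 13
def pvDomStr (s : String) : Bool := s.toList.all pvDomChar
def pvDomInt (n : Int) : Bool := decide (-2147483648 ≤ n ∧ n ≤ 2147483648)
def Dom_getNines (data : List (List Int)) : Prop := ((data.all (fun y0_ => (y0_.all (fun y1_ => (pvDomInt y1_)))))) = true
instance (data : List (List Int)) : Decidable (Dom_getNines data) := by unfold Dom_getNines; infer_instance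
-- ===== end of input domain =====

-- B replaces A's global backward level-by-level set-propagation DP with a per-trailhead top-down
-- DFS collecting the set of distinct 9-positions; objective: simpler (and measured faster).

-- ===== PORT A =====
-- dirs and getVal are module-level helpers that appear VERBATIM in both Source A and Source B (B reuses
-- getVal/dirs unchanged), so they are shared by both ports.
def dirsL : List (Int × Int) := [(0, 1), (0, -1), (1, 0), (-1, 0)]

def getVal (data : List (List Int)) (pos : Int × Int) : Option Int :=
  if 0 ≤ pos.1 ∧ pos.1 < (data.length : Int) ∧ 0 ≤ pos.2 ∧ pos.2 < ((data.headD []).length : Int) then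
    -- data[r][c]: the inner pyGet? is none exactly where Python raises IndexError (a ragged row
    -- shorter than data[0]); every executed call returning none that way is excluded by Pre_.
    PySem.List.pyGet? ((PySem.List.pyGet? data pos.1).getD []) pos.2
  else none

def countNines (data : List (List Int)) (paths : PySem.Dict (Int × Int) (PySem.Set (Int × Int)))
    (current : Int × Int) : PySem.Set (Int × Int) :=
  match getVal data current with
  | none => PySem.Set.empty
  | some val =>
    -- defaultdict read paths[next]: modelled as getD with default ∅; the silent insertion of an
    -- empty set for a missing key is unobservable in getNines's result (all reads default to ∅).
    dirsL.foldl (fun acc d =>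
      let next := (current.1 + d.1, current.2 + d.2)
      if getVal data next == some (val + 1) then
        PySem.Set.update acc (paths.getD next PySem.Set.empty)
      else acc) PySem.Set.empty

-- proof-side name for A's inner-loop body (the port below unfolds to folds of this by rfl)
def cellStepA (data : List (List Int)) (i : Int)
    (st : PySem.Dict Int (PySem.Set (Int × Int)) × PySem.Dict (Int × Int) (PySem.Set (Int × Int)))
    (p : Int × Int) :
    PySem.Dict Int (PySem.Set (Int × Int)) × PySem.Dict (Int × Int) (PySem.Set (Int × Int)) :=
  let val := getVal data p
  if i == 9 && val == some i then
    (st.1.modify 9 PySem.Set.empty (fun s => PySem.Set.add s p),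
     st.2.modify p PySem.Set.empty (fun s => PySem.Set.add s p))
  else if val == some i then
    let ns := countNines data st.2 p
    (st.1.modify i PySem.Set.empty (fun s => PySem.Set.add s p),
     st.2.modify p PySem.Set.empty (fun s => PySem.Set.update s ns))
  else st

def getNines (data : List (List Int)) : Int :=
  let st :=
    (PySem.List.pyRange 9 (-1) (-1)).foldl (fun st i =>
      (PySem.List.pyRange 0 (data.length : Int)).foldl (fun st r =>
        (PySem.List.pyRange 0 (((PySem.List.pyGet? data r).getD []).length : Int)).foldl (fun st c =>
          cellStepA data i st (r, c)) st) st)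
      ((PySem.Dict.empty, PySem.Dict.empty) :
        PySem.Dict Int (PySem.Set (Int × Int)) × PySem.Dict (Int × Int) (PySem.Set (Int × Int)))
  ((st.1.getD 0 PySem.Set.empty).map (fun pos => ((st.2.getD pos PySem.Set.empty).length : Int))).sum

-- ===== PORT B =====
def ninesRec (data : List (List Int)) (fuel : Nat) (pos : Int × Int) : PySem.Set (Int × Int) :=
  match fuel with
  | 0 => PySem.Set.empty -- fuel guard only (never hit: values rise by 1 per call and stop at 9)
  | fuel + 1 =>
    match getVal data pos with
    | none => PySem.Set.empty -- unreachable guard: nines is only invoked where getVal is a value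
    | some val =>
      if val == 9 then PySem.Set.add PySem.Set.empty pos
      else
        dirsL.foldl (fun acc d =>
          let next := (pos.1 + d.1, pos.2 + d.2)
          if getVal data next == some (val + 1) then
            PySem.Set.update acc (ninesRec data fuel next)
          else acc) PySem.Set.empty

def getNines_alt (data : List (List Int)) : Int :=
  (PySem.List.pyRange 0 (data.length : Int)).foldl (fun total r =>
    (PySem.List.pyRange 0 (((PySem.List.pyGet? data r).getD []).length : Int)).foldl (fun total c =>
      if getVal data (r, c) == some 0 then
        total + ((ninesRec data 10 (r, c)).length : Int)
      else total) total) 0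

-- ===== PRECONDITION & SPEC =====
-- Pre_ excludes exactly the inputs on which A raises IndexError: some cell holding a value in 0..8
-- has a 4-neighbour whose column is inside the len(data[0]) bound that getVal checks but at or
-- beyond the end of its own (shorter) row, so countNines' getVal indexes data[r][c] out of range.
def Pre_getNines (data : List (List Int)) : Prop :=
  ∀ r ∈ List.range data.length, ∀ c ∈ List.range (min (data.getD r []).length (data.headD []).length),
    (0 ≤ (data.getD r []).getD c 0 ∧ (data.getD r []).getD c 0 ≤ 8) →
    ∀ d ∈ ([(0, 1), (0, -1), (1, 0), (-1, 0)] : List (Int × Int)),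
      ¬ (0 ≤ (r : Int) + d.1 ∧ (r : Int) + d.1 < (data.length : Int) ∧
         0 ≤ (c : Int) + d.2 ∧ (c : Int) + d.2 < ((data.headD []).length : Int) ∧
         ((data.getD ((r : Int) + d.1).toNat []).length : Int) ≤ (c : Int) + d.2)
instance (data : List (List Int)) : Decidable (Pre_getNines data) := by
  unfold Pre_getNines; infer_instance

def pvWitness_getNines : List (List Int) := [[0, 1, 2, 3, 4, 5, 6, 7, 8, 9]]

def Spec_getNines (data : List (List Int)) (out : Int) : Prop := out = getNines_alt data
instance (data : List (List Int)) (out : Int) : Decidable (Spec_getNines data out) := by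
  unfold Spec_getNines; infer_instance

-- ===== CLAIM (what is proved, stated in full; the proofs are below) =====
def Claim_equal_getNines : Prop :=
  ∀ (data : List (List Int)), Dom_getNines data → Pre_getNines data →
    Spec_getNines data (getNines data)

-- ===== LEMMAS AND PROOFS =====

-- row-major list of all loop positions (r, c), 0 ≤ r < len(data), 0 ≤ c < len(data[r])
def cells (data : List (List Int)) : List (Int × Int) :=
  (PySem.List.pyRange 0 (data.length : Int)).flatMap (fun r =>
    (PySem.List.pyRange 0 (((PySem.List.pyGet? data r).getD []).length : Int)).map (fun c => (r, c)))

theorem foldl_flatMap {α β σ : Type} (l : List α) (g : α → List β) (f : σ → β → σ) (init : σ) :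
    (l.flatMap g).foldl f init = l.foldl (fun s a => (g a).foldl f s) init := by
  induction l generalizing init with
  | nil => rfl
  | cons x xs ih => simp [List.flatMap_cons, List.foldl_append, ih]

theorem double_fold_eq (data : List (List Int)) {σ : Type} (f : σ → Int × Int → σ) (init : σ) :
    (PySem.List.pyRange 0 (data.length : Int)).foldl (fun s r =>
      (PySem.List.pyRange 0 (((PySem.List.pyGet? data r).getD []).length : Int)).foldl
        (fun s c => f s (r, c)) s) init
    = (cells data).foldl f init := by
  rw [cells, foldl_flatMap]
  simp [List.foldl_map]

theorem mem_cells {data : List (List Int)} {p : Int × Int} :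
    p ∈ cells data ↔ 0 ≤ p.1 ∧ p.1 < (data.length : Int) ∧ 0 ≤ p.2 ∧
      p.2 < (((PySem.List.pyGet? data p.1).getD []).length : Int) := by
  constructor
  · intro h
    simp only [cells, List.mem_flatMap, List.mem_map] at h
    obtain ⟨r, hr, c, hc, rfl⟩ := h
    rw [PySem.List.mem_pyRange_one] at hr hc
    exact ⟨hr.1, hr.2, hc.1, hc.2⟩
  · rintro ⟨h1, h2, h3, h4⟩
    simp only [cells, List.mem_flatMap, List.mem_map]
    exact ⟨p.1, PySem.List.mem_pyRange_one.mpr ⟨h1, h2⟩,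
      p.2, PySem.List.mem_pyRange_one.mpr ⟨h3, h4⟩, by simp⟩

theorem nodup_pyRange_one (a b : Int) : (PySem.List.pyRange a b).Nodup := by
  rcases le_or_gt b a with hb | hb
  · have : PySem.List.pyRange a b = [] := by
      by_contra hne
      obtain ⟨x, hx⟩ := List.exists_mem_of_ne_nil _ hne
      rw [PySem.List.mem_pyRange_one] at hx
      omega
    rw [this]; exact List.nodup_nil
  · have hsub : ∀ k : Nat, (PySem.List.pyRange a (a + k)).Nodup := by
      intro k
      induction k with
      | zero =>
        have h0 : PySem.List.pyRange a (a + ((0 : Nat) : Int)) = [] := by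
          by_contra hne
          obtain ⟨x, hx⟩ := List.exists_mem_of_ne_nil _ hne
          rw [PySem.List.mem_pyRange_one] at hx
          omega
        rw [h0]
        exact List.nodup_nil
      | succ n ih =>
        have hcast : (a + ((n : Int) + 1)) = a + ((n + 1 : Nat) : Int) := by push_cast; ring
        have hstep : PySem.List.pyRange a (a + ((n + 1 : Nat) : Int)) =
            PySem.List.pyRange a (a + n) ++ [a + n] := by
          have h2 := PySem.List.pyRange_one_succ_right (a := a) (b := a + n) (by omega)
          rw [← hcast]
          simpa [add_assoc] using h2
        rw [hstep, List.nodup_append]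
        refine ⟨ih, List.nodup_singleton _, ?_⟩
        intro x hx y hy
        rw [PySem.List.mem_pyRange_one] at hx
        simp at hy
        omega
    have hb' : b = a + (b - a).toNat := by omega
    rw [hb']
    exact hsub _

theorem nodup_cells (data : List (List Int)) : (cells data).Nodup := by
  rw [cells, List.nodup_flatMap]
  constructor
  · intro r _
    refine (nodup_pyRange_one _ _).map ?_
    intro c c' h
    injection h with _ h2
  · refine List.Pairwise.imp ?_ (nodup_pyRange_one 0 _)
    intro r r' hne
    simp only [Function.onFun, List.disjoint_left]
    intro x hx hy
    simp only [List.mem_map] at hx hy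
    obtain ⟨c, _, rfl⟩ := hx
    obtain ⟨c', _, heq⟩ := hy
    simp only [Prod.mk.injEq] at heq
    exact hne heq.1.symm

theorem getVal_mem_cells {data : List (List Int)} {p : Int × Int} {v : Int}
    (h : getVal data p = some v) : p ∈ cells data := by
  rw [getVal] at h
  split at h
  case isTrue hcond =>
    obtain ⟨h1, h2, h3, h4⟩ := hcond
    refine mem_cells.mpr ⟨h1, h2, h3, ?_⟩
    by_contra hge
    rw [not_lt] at hge
    generalize hrow : (PySem.List.pyGet? data p.1).getD [] = row at h hge
    have hnone : PySem.List.pyGet? row p.2 = none := by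
      simp only [PySem.List.pyGet?, PySem.List.pyIdx?, Option.bind_eq_none_iff,
        getElem?_eq_none_iff, not_lt]
      intro a ha
      rw [if_pos h3, if_neg (by omega)] at ha
      exact absurd ha (by simp)
    rw [hnone] at h
    exact absurd h (by simp)
  case isFalse => exact absurd h (by simp)

-- membership / nodup of the shared fold shape "for d in dirs: if cond then acc |= S d"
theorem foldSet_mem {β : Type} (l : List β) (cond : β → Bool) (S : β → List (Int × Int))
    (init : PySem.Set (Int × Int)) (q : Int × Int) :
    q ∈ l.foldl (fun acc d => if cond d then PySem.Set.update acc (S d) else acc) init ↔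
      q ∈ init ∨ ∃ d ∈ l, cond d ∧ q ∈ S d := by
  induction l generalizing init with
  | nil => simp
  | cons x xs ih =>
    by_cases h : cond x = true <;> simp [h, ih, PySem.Set.mem_update] <;> tauto

theorem foldSet_nodup {β : Type} (l : List β) (cond : β → Bool) (S : β → List (Int × Int))
    (init : PySem.Set (Int × Int)) (h : init.Nodup) :
    (l.foldl (fun acc d => if cond d then PySem.Set.update acc (S d) else acc) init).Nodup := by
  induction l generalizing init with
  | nil => exact h
  | cons x xs ih =>
    by_cases hc : cond x = true <;> simp [hc]
    · exact ih _ (PySem.Set.nodup_update _ _ h)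
    · exact ih _ h

theorem ninesRec_nodup (data : List (List Int)) (fuel : Nat) (p : Int × Int) :
    (ninesRec data fuel p).Nodup := by
  induction fuel generalizing p with
  | zero => simp [ninesRec, PySem.Set.empty]
  | succ f ih =>
    rw [ninesRec]
    cases h : getVal data p with
    | none => simp [PySem.Set.empty]
    | some v =>
      by_cases h9 : v == 9
      · simp [h9, PySem.Set.add, PySem.Set.empty]
      · simp only [h9, if_false, Bool.false_eq_true]
        exact foldSet_nodup _ _ _ _ (by simp [PySem.Set.empty])

-- the target set for a cell of value v: what B's DFS computes with the fuel it gets there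
def SetOK (data : List (List Int)) (v : Int) (p : Int × Int) (s : PySem.Set (Int × Int)) : Prop :=
  s.Nodup ∧ ∀ q, q ∈ s ↔ q ∈ ninesRec data (10 - v).toNat p

-- loop invariant between passes: st is A's state after passes 9, 8, …, i
def LoopInv (data : List (List Int)) (i : Int)
    (st : PySem.Dict Int (PySem.Set (Int × Int)) × PySem.Dict (Int × Int) (PySem.Set (Int × Int))) :
    Prop :=
  (∀ p v, getVal data p = some v →
      ((i ≤ v ∧ v ≤ 9) → SetOK data v p (st.2.getD p PySem.Set.empty)) ∧
      (¬(i ≤ v ∧ v ≤ 9) → st.2.getD p PySem.Set.empty = [])) ∧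
  (∀ p, getVal data p = none → st.2.getD p PySem.Set.empty = []) ∧
  (st.1.getD 0 PySem.Set.empty =
    if i ≤ 0 then (cells data).filter (fun p => getVal data p == some 0) else [])

-- invariant inside pass i, after processing the prefix P of (cells data)
def MidInv (data : List (List Int)) (i : Int) (P : List (Int × Int))
    (st : PySem.Dict Int (PySem.Set (Int × Int)) × PySem.Dict (Int × Int) (PySem.Set (Int × Int))) :
    Prop :=
  (∀ p v, getVal data p = some v →
      (((i < v ∧ v ≤ 9) ∨ (v = i ∧ p ∈ P)) → SetOK data v p (st.2.getD p PySem.Set.empty)) ∧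
      ((v < i ∨ 9 < v ∨ (v = i ∧ p ∉ P)) → st.2.getD p PySem.Set.empty = [])) ∧
  (∀ p, getVal data p = none → st.2.getD p PySem.Set.empty = []) ∧
  (st.1.getD 0 PySem.Set.empty =
    if i = 0 then P.filter (fun p => getVal data p == some 0) else [])

theorem countNines_eq (data : List (List Int)) (paths : PySem.Dict (Int × Int) (PySem.Set (Int × Int)))
    (p : Int × Int) (v : Int) (h : getVal data p = some v) :
    countNines data paths p = dirsL.foldl (fun acc d =>
      if getVal data (p.1 + d.1, p.2 + d.2) == some (v + 1) then
        PySem.Set.update acc (paths.getD (p.1 + d.1, p.2 + d.2) PySem.Set.empty)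
      else acc) PySem.Set.empty := by
  rw [countNines, h]

theorem ninesRec_succ (data : List (List Int)) (k : Nat) (p : Int × Int) (v : Int)
    (h : getVal data p = some v) (h9 : v ≠ 9) :
    ninesRec data (k + 1) p = dirsL.foldl (fun acc d =>
      if getVal data (p.1 + d.1, p.2 + d.2) == some (v + 1) then
        PySem.Set.update acc (ninesRec data k (p.1 + d.1, p.2 + d.2))
      else acc) PySem.Set.empty := by
  rw [ninesRec, h]
  simp [h9]

theorem ninesRec_nine (data : List (List Int)) (k : Nat) (p : Int × Int)
    (h : getVal data p = some 9) : ninesRec data (k + 1) p = [p] := by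
  rw [ninesRec, h]
  simp [PySem.Set.add, PySem.Set.empty, PySem.Set.contains]

theorem midInv_extend (data : List (List Int)) (i : Int) (P : List (Int × Int)) (p : Int × Int)
    (st : PySem.Dict Int (PySem.Set (Int × Int)) × PySem.Dict (Int × Int) (PySem.Set (Int × Int)))
    (h : MidInv data i P st) (hp : getVal data p ≠ some i) :
    MidInv data i (P ++ [p]) st := by
  obtain ⟨h1, h2, h3⟩ := h
  refine ⟨fun p' v hv => ?_, h2, ?_⟩
  · obtain ⟨ha, hb⟩ := h1 p' v hv
    constructor
    · rintro (hc | ⟨rfl, hm⟩)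
      · exact ha (Or.inl hc)
      · rcases List.mem_append.mp hm with hm | hm
        · exact ha (Or.inr ⟨rfl, hm⟩)
        · simp at hm; subst hm; exact absurd hv hp
    · rintro (hc | hc | ⟨rfl, hm⟩)
      · exact hb (Or.inl hc)
      · exact hb (Or.inr (Or.inl hc))
      · exact hb (Or.inr (Or.inr ⟨rfl, fun hmp => hm (List.mem_append.mpr (Or.inl hmp))⟩))
  · rw [h3]
    by_cases hi : i = 0
    · subst hi
      have hf : (getVal data p == some 0) = false := beq_eq_false_iff_ne.mpr hp
      rw [if_pos rfl, if_pos rfl, List.filter_append]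
      simp [hf]
    · simp [hi]

theorem not_mem_of_cells_split {data : List (List Int)} {P S : List (Int × Int)}
    {p : Int × Int} (hcells : cells data = P ++ p :: S) : p ∉ P := by
  have hnd := nodup_cells data
  rw [hcells, List.nodup_append] at hnd
  intro hm
  exact hnd.2.2 p hm p List.mem_cons_self rfl

-- the two updating branches of A's inner loop, abstracted over the new paths entry
theorem midInv_active (data : List (List Int)) (i : Int) (h0 : 0 ≤ i) (h9 : i ≤ 9)
    (P : List (Int × Int)) (p : Int × Int)
    (st : PySem.Dict Int (PySem.Set (Int × Int)) × PySem.Dict (Int × Int) (PySem.Set (Int × Int)))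
    (h : MidInv data i P st) (hval : getVal data p = some i) (hpP : p ∉ P)
    (spots' : PySem.Dict Int (PySem.Set (Int × Int)))
    (paths' : PySem.Dict (Int × Int) (PySem.Set (Int × Int)))
    (ns' : PySem.Set (Int × Int))
    (hpaths : ∀ p', paths'.getD p' PySem.Set.empty =
      if p' = p then ns' else st.2.getD p' PySem.Set.empty)
    (hok : SetOK data i p ns')
    (hspots : spots'.getD 0 PySem.Set.empty =
      if i = 0 then PySem.Set.add (st.1.getD 0 PySem.Set.empty) p
      else st.1.getD 0 PySem.Set.empty) :
    MidInv data i (P ++ [p]) (spots', paths') := by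
  obtain ⟨h1, h2, h3⟩ := h
  refine ⟨fun p' w hw => ?_, fun p' hw => ?_, ?_⟩
  · by_cases hpp : p' = p
    · subst hpp
      have hwi : w = i := by
        rw [hval] at hw; injection hw with h'; omega
      subst hwi
      constructor
      · intro _
        rw [hpaths, if_pos rfl]; exact hok
      · rintro (hc | hc | ⟨_, hm⟩)
        · omega
        · omega
        · exact absurd (List.mem_append.mpr (Or.inr List.mem_cons_self)) hm
    · obtain ⟨ha, hb⟩ := h1 p' w hw
      rw [hpaths, if_neg hpp]
      constructor
      · rintro (hc | ⟨rfl, hm⟩)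
        · exact ha (Or.inl hc)
        · rcases List.mem_append.mp hm with hm | hm
          · exact ha (Or.inr ⟨rfl, hm⟩)
          · simp at hm; exact absurd hm hpp
      · rintro (hc | hc | ⟨rfl, hm⟩)
        · exact hb (Or.inl hc)
        · exact hb (Or.inr (Or.inl hc))
        · exact hb (Or.inr (Or.inr ⟨rfl, fun hmp => hm (List.mem_append.mpr (Or.inl hmp))⟩))
  · have hpp : p' ≠ p := by intro hh; subst hh; simp [hval] at hw
    rw [hpaths, if_neg hpp]
    exact h2 p' hw
  · rw [hspots, h3]
    by_cases hi : i = 0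
    · subst hi
      have ht : (getVal data p == some 0) = true := by simp [hval]
      have hnm : p ∉ List.filter (fun q => getVal data q == some 0) P := by
        intro hm; exact hpP (List.mem_of_mem_filter hm)
      rw [if_pos rfl, if_pos rfl, PySem.Set.add_of_not_mem hnm, List.filter_append]
      simp [ht]
    · simp [hi]

theorem midInv_step (data : List (List Int)) (i : Int) (h0 : 0 ≤ i) (h9 : i ≤ 9)
    (P S : List (Int × Int)) (p : Int × Int) (hcells : cells data = P ++ p :: S)
    (st : PySem.Dict Int (PySem.Set (Int × Int)) × PySem.Dict (Int × Int) (PySem.Set (Int × Int)))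
    (h : MidInv data i P st) :
    MidInv data i (P ++ [p]) (cellStepA data i st p) := by
  have hpP : p ∉ P := not_mem_of_cells_split hcells
  cases hval : getVal data p with
  | none =>
    have hst : cellStepA data i st p = st := by
      rw [cellStepA]; simp [hval]
    rw [hst]
    exact midInv_extend data i P p st h (by rw [hval]; simp)
  | some v =>
    by_cases hvi : v = i
    · subst hvi
      have hold : st.2.getD p PySem.Set.empty = [] :=
        (h.1 p v hval).2 (Or.inr (Or.inr ⟨rfl, hpP⟩))
      by_cases hi9 : v = 9
      · subst hi9
        have hstep : cellStepA data 9 st p =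
            (st.1.modify 9 PySem.Set.empty (fun s => PySem.Set.add s p),
             st.2.modify p PySem.Set.empty (fun s => PySem.Set.add s p)) := by
          rw [cellStepA]; simp [hval]
        rw [hstep]
        refine midInv_active data 9 (by omega) (by omega) P p st h hval hpP _ _ [p]
          (fun p' => ?_) ?_ ?_
        · rw [PySem.Dict.getD_modify]
          by_cases hpp : p' = p
          · rw [if_pos hpp, if_pos hpp, hold]
            rfl
          · rw [if_neg hpp, if_neg hpp]
        · constructor
          · simp
          · intro q
            rw [show ((10 : Int) - 9).toNat = 1 from rfl, ninesRec_nine data 0 p hval]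
        · rw [PySem.Dict.getD_modify, if_neg (by norm_num)]
          norm_num
      · have hi8 : v ≤ 8 := by omega
        have hstep : cellStepA data v st p =
            (st.1.modify v PySem.Set.empty (fun s => PySem.Set.add s p),
             st.2.modify p PySem.Set.empty
               (fun s => PySem.Set.update s (countNines data st.2 p))) := by
          rw [cellStepA]; simp [hval, hi9]
        rw [hstep]
        refine midInv_active data v (by omega) (by omega) P p st h hval hpP _ _
          (PySem.Set.ofList (countNines data st.2 p)) (fun p' => ?_) ?_ ?_
        · rw [PySem.Dict.getD_modify]
          by_cases hpp : p' = p
          · rw [if_pos hpp, if_pos hpp, hold, PySem.Set.update_nil_left]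
          · rw [if_neg hpp, if_neg hpp]
        · constructor
          · exact PySem.Set.nodup_ofList _
          · intro q
            rw [PySem.Set.mem_ofList]
            have harith : ((10 : Int) - v).toNat = ((10 : Int) - (v + 1)).toNat + 1 := by omega
            rw [harith, ninesRec_succ data _ p v hval hi9]
            rw [countNines_eq data st.2 p v hval]
            rw [foldSet_mem, foldSet_mem]
            constructor
            · rintro (hq | ⟨d, hd, hg, hq⟩)
              · simp [PySem.Set.empty] at hq
              · refine Or.inr ⟨d, hd, hg, ?_⟩
                have hg' : getVal data (p.1 + d.1, p.2 + d.2) = some (v + 1) := by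
                  simpa using hg
                exact (((h.1 _ (v + 1) hg').1 (Or.inl ⟨by omega, by omega⟩)).2 q).mp hq
            · rintro (hq | ⟨d, hd, hg, hq⟩)
              · simp [PySem.Set.empty] at hq
              · refine Or.inr ⟨d, hd, hg, ?_⟩
                have hg' : getVal data (p.1 + d.1, p.2 + d.2) = some (v + 1) := by
                  simpa using hg
                exact (((h.1 _ (v + 1) hg').1 (Or.inl ⟨by omega, by omega⟩)).2 q).mpr hq
        · rw [PySem.Dict.getD_modify]
          by_cases hv0 : v = 0
          · subst hv0; simp
          · rw [if_neg (by omega), if_neg hv0]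
    · have hst : cellStepA data i st p = st := by
        rw [cellStepA]; simp [hval, hvi]
      rw [hst]
      refine midInv_extend data i P p st h ?_
      rw [hval]; simp; exact hvi

theorem midInv_fold (data : List (List Int)) (i : Int) (h0 : 0 ≤ i) (h9 : i ≤ 9)
    (P S : List (Int × Int)) (hcells : cells data = P ++ S)
    (st : PySem.Dict Int (PySem.Set (Int × Int)) × PySem.Dict (Int × Int) (PySem.Set (Int × Int)))
    (h : MidInv data i P st) :
    MidInv data i (P ++ S) (S.foldl (cellStepA data i) st) := by
  induction S generalizing P st with
  | nil => simpa using h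
  | cons x xs ih =>
    have h1 := midInv_step data i h0 h9 P xs x hcells st h
    have h2 := ih (P ++ [x]) (by simpa using hcells) _ h1
    simpa using h2

theorem pass_step (data : List (List Int)) (i : Int) (h0 : 0 ≤ i) (h9 : i ≤ 9)
    (st : _) (h : LoopInv data (i + 1) st) :
    LoopInv data i ((cells data).foldl (cellStepA data i) st) := by
  have hmid0 : MidInv data i [] st := by
    obtain ⟨h1, h2, h3⟩ := h
    refine ⟨fun p v hv => ?_, h2, ?_⟩
    · obtain ⟨ha, hb⟩ := h1 p v hv
      constructor
      · rintro (⟨hl, hr⟩ | ⟨_, hm⟩)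
        · exact ha ⟨by omega, hr⟩
        · simp at hm
      · rintro (hl | hl | ⟨rfl, _⟩)
        · exact hb (by omega)
        · exact hb (by omega)
        · exact hb (by omega)
    · rw [h3]; have : ¬ (i + 1 ≤ 0) := by omega
      simp [this]
  have hfin := midInv_fold data i h0 h9 [] (cells data) (by simp) st hmid0
  simp only [List.nil_append] at hfin
  obtain ⟨h1, h2, h3⟩ := hfin
  refine ⟨fun p v hv => ?_, h2, ?_⟩
  · obtain ⟨ha, hb⟩ := h1 p v hv
    constructor
    · rintro ⟨hl, hr⟩
      rcases lt_or_eq_of_le hl with hlt | heq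
      · exact ha (Or.inl ⟨hlt, hr⟩)
      · exact ha (Or.inr ⟨heq.symm, getVal_mem_cells hv⟩)
    · intro hn; exact hb (by omega)
  · rw [h3]
    by_cases hi : i = 0 <;> simp [hi]
    omega

def finalStateA (data : List (List Int)) :
    PySem.Dict Int (PySem.Set (Int × Int)) × PySem.Dict (Int × Int) (PySem.Set (Int × Int)) :=
  ([9, 8, 7, 6, 5, 4, 3, 2, 1, 0] : List Int).foldl
    (fun st i => (cells data).foldl (cellStepA data i) st) (PySem.Dict.empty, PySem.Dict.empty)

theorem inv_final (data : List (List Int)) :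
    LoopInv data 0 (finalStateA data) := by
  have h10 : LoopInv data 10 ((PySem.Dict.empty, PySem.Dict.empty) :
      PySem.Dict Int (PySem.Set (Int × Int)) × PySem.Dict (Int × Int) (PySem.Set (Int × Int))) := by
    refine ⟨fun p v hv => ⟨fun hc => by omega, fun _ => by simp [PySem.Dict.getD_empty]⟩,
      fun p _ => by simp [PySem.Dict.getD_empty], ?_⟩
    simp [PySem.Dict.getD_empty]
  rw [finalStateA]
  simp only [List.foldl_cons, List.foldl_nil]
  exact pass_step data 0 (by omega) (by omega) _
    (pass_step data 1 (by omega) (by omega) _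
      (pass_step data 2 (by omega) (by omega) _
        (pass_step data 3 (by omega) (by omega) _
          (pass_step data 4 (by omega) (by omega) _
            (pass_step data 5 (by omega) (by omega) _
              (pass_step data 6 (by omega) (by omega) _
                (pass_step data 7 (by omega) (by omega) _
                  (pass_step data 8 (by omega) (by omega) _
                    (pass_step data 9 (by omega) (by omega) _ h10)))))))))

theorem foldl_if_add {γ : Type} (l : List γ) (c : γ → Bool) (f : γ → Int) (t0 : Int) :
    l.foldl (fun t p => if c p then t + f p else t) t0 = t0 + ((l.filter c).map f).sum := by
  induction l generalizing t0 with
  | nil => simp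
  | cons x xs ih =>
    by_cases h : c x = true <;> simp [h, ih, add_assoc]

theorem getNines_spec' (data : List (List Int)) : getNines data = getNines_alt data := by
  have hA : getNines data =
      (((finalStateA data).1.getD 0 PySem.Set.empty).map
        (fun pos => (((finalStateA data).2.getD pos PySem.Set.empty).length : Int))).sum := by
    rw [getNines]
    have hr : PySem.List.pyRange 9 (-1) (-1) = ([9, 8, 7, 6, 5, 4, 3, 2, 1, 0] : List Int) := by
      decide
    rw [hr]
    simp only [List.foldl_cons, List.foldl_nil, double_fold_eq]
    rw [finalStateA]
    simp only [List.foldl_cons, List.foldl_nil]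
  have hB : getNines_alt data = (cells data).foldl
      (fun total p => if getVal data p == some 0 then
        total + ((ninesRec data 10 p).length : Int) else total) 0 := by
    rw [getNines_alt, ← double_fold_eq]
  obtain ⟨h1, _, h3⟩ := inv_final data
  rw [hA, hB, h3, if_pos (by omega), foldl_if_add, zero_add]
  apply congrArg
  apply List.map_congr_left
  intro p hp
  simp only [List.mem_filter, beq_iff_eq] at hp
  obtain ⟨hpc, hp0⟩ := hp
  obtain ⟨ha, _⟩ := h1 p 0 hp0
  obtain ⟨hnd, hmem⟩ := ha ⟨le_refl 0, by omega⟩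
  have h10 : ((10 : Int) - 0).toNat = 10 := by decide
  rw [h10] at hmem
  congr 1
  exact ((List.perm_ext_iff_of_nodup hnd (ninesRec_nodup data 10 p)).mpr hmem).length_eq

-- ===== VERDICT (by name: the statement is the Claim_ definition above) =====
theorem getNines_spec : Claim_equal_getNines := by
  intro data _ _
  exact getNines_spec' data
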